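-- pv_equiv track=rewrite | github.com/ben-martinez/Tic-Tac-Train | rule_evolution/util/game_util.py | game_sequence_to_state
-- ===== SOURCE A (Python) =====
-- from typing import List, Tuple, Any
-- from enum import Enum
--
-- class Marker(Enum):
--     EMPTY = 0
--     PLAYER1 = 1
--     PLAYER2 = 2
--
-- def game_sequence_to_state(game_sequence: List[int],
--                            dim: Tuple[int, int] = (3, 3)) -> Tuple[List[List[int]], int]:
--     """
--     Converts a sequence of moves into a 2D state.
--     Does not guard against terminal states.
--
--     Parameters:
--         game_sequence: A list of numbers in range 1...width * height representing the game moves.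
--         dim: A tuple that defines the dimension of the game board (width, height).
--
--     Returns:
--         Game state as a 2D array where 0 represents an empty cell,
--         1 represents a move by player 1, and 2 represents a move by
--         player 2.
--
--         Next player marker.
--     """
--     assert len(dim) == 2
--
--     width, height = dim
--     assert width > 0 and height > 0
--
--     assert all(isinstance(move, int) and 1 <= move <= width * height for move in game_sequence)
--
--     state = [[Marker.EMPTY.value for _ in range(width)] for _ in range(height)]
--     for i, move in enumerate(game_sequence):
--         marker = i % 2 + 1
--         row, col = (move - 1) // width, (move - 1) % width
--
--         assert state[row][col] == Marker.EMPTY.value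
--         state[row][col] = marker
--
--     next_marker = len(game_sequence) % 2 + 1
--     return state, next_marker
-- ===== SOURCE B (Python) =====
-- from typing import List, Tuple
--
--
-- def game_sequence_to_state(game_sequence: List[int],
--                            dim: Tuple[int, int] = (3, 3)) -> Tuple[List[List[int]], int]:
--     """Two-pass rewrite: index moves into a dict keyed by flat cell index,
--     then rebuild the 2D grid by lookup."""
--     assert len(dim) == 2
--
--     width, height = dim
--     assert width > 0 and height > 0
--
--     assert all(isinstance(move, int) and 1 <= move <= width * height for move in game_sequence)
--
--     placed = {}
--     for i, move in enumerate(game_sequence):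
--         assert (move - 1) not in placed
--         placed[move - 1] = i % 2 + 1
--
--     state = [[placed.get(row * width + col, 0) for col in range(width)]
--              for row in range(height)]
--
--     next_marker = len(game_sequence) % 2 + 1
--     return state, next_marker
-- ===== Notes on version B (the rewrite author's own statement) =====
-- stated objective: alternative
-- what changed: B replaces A's in-place nested-list mutation loop by two passes: one scan builds a dict from flat cell index (move-1) to marker, then the grid is rebuilt cell-by-cell via dict lookup with default 0.
import Mathlib
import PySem

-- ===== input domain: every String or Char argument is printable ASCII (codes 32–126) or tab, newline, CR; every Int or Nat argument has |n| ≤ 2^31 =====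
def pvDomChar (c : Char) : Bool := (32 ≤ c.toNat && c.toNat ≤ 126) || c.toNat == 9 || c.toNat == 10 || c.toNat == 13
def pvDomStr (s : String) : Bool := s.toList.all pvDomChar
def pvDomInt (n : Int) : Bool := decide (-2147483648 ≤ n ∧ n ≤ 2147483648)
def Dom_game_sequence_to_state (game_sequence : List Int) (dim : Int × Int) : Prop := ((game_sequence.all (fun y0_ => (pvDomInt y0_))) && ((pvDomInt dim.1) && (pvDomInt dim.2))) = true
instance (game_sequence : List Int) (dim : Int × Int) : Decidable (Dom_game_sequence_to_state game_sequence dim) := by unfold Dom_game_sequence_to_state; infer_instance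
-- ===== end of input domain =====

-- B replaces A's in-place grid mutation by a dict-index pass followed by a lookup-rebuild pass (alternative decomposition, same cost).


-- ===== PORT A =====
-- state[row][col] = marker : exact for 0 ≤ row < height and 0 ≤ col < width, which Pre_ guarantees
def placeMove (width : Int) (st : List (List Int)) (p : Int × Int) : List (List Int) :=
  let marker : Int := PySem.Int.mod p.1 2 + 1
  let row : Int := PySem.Int.floordiv (p.2 - 1) width
  let col : Int := PySem.Int.mod (p.2 - 1) width
  PySem.List.pySetD st row (PySem.List.pySetD (PySem.List.pyGetD st row []) col marker)

def game_sequence_to_state (game_sequence : List Int) (dim : Int × Int) : List (List Int) × Int :=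
  let width := dim.1
  let height := dim.2
  let state0 : List (List Int) :=
    (PySem.List.pyRange 0 height 1).map (fun _ => (PySem.List.pyRange 0 width 1).map (fun _ => (0 : Int)))
  let state := (PySem.List.enumerate game_sequence).foldl (placeMove width) state0
  (state, PySem.Int.mod (PySem.List.len game_sequence) 2 + 1)

-- ===== PORT B =====
def game_sequence_to_state_alt (game_sequence : List Int) (dim : Int × Int) : List (List Int) × Int :=
  let width := dim.1
  let height := dim.2
  let placed : PySem.Dict Int Int :=
    (PySem.List.enumerate game_sequence).foldl
      (fun d p => d.insert (p.2 - 1) (PySem.Int.mod p.1 2 + 1)) PySem.Dict.empty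
  let state :=
    (PySem.List.pyRange 0 height 1).map (fun row =>
      (PySem.List.pyRange 0 width 1).map (fun col => placed.getD (row * width + col) 0))
  (state, PySem.Int.mod (PySem.List.len game_sequence) 2 + 1)

-- ===== PRECONDITION & SPEC =====
-- Pre_ excludes exactly the inputs on which A raises AssertionError: a non-positive
-- dimension, a move outside 1..width*height, or a duplicate move (occupied cell).
def Pre_game_sequence_to_state (game_sequence : List Int) (dim : Int × Int) : Prop :=
  0 < dim.1 ∧ 0 < dim.2 ∧ (∀ m ∈ game_sequence, 1 ≤ m ∧ m ≤ dim.1 * dim.2) ∧ game_sequence.Nodup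
instance (game_sequence : List Int) (dim : Int × Int) : Decidable (Pre_game_sequence_to_state game_sequence dim) := by
  unfold Pre_game_sequence_to_state; infer_instance

def pvWitness_game_sequence_to_state : List Int × (Int × Int) := ([5, 1, 9, 2], (3, 3))

def Spec_game_sequence_to_state (game_sequence : List Int) (dim : Int × Int) (out : List (List Int) × Int) : Prop := out = game_sequence_to_state_alt game_sequence dim
instance (game_sequence : List Int) (dim : Int × Int) (out : List (List Int) × Int) : Decidable (Spec_game_sequence_to_state game_sequence dim out) := by unfold Spec_game_sequence_to_state; infer_instance

-- ===== CLAIM (what is proved, stated in full; the proofs are below) =====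
def Claim_equal_game_sequence_to_state : Prop := ∀ (game_sequence : List Int) (dim : Int × Int), Dom_game_sequence_to_state game_sequence dim → Pre_game_sequence_to_state game_sequence dim → Spec_game_sequence_to_state game_sequence dim (game_sequence_to_state game_sequence dim)

-- ===== LEMMAS AND PROOFS =====

-- the cell key r*w+c determines (r, c) when 0 ≤ c, c' < w
lemma cell_key_inj (w r r' c c' : Int) (hw : 0 < w) (hc : 0 ≤ c) (hcw : c < w)
    (hc' : 0 ≤ c') (hcw' : c' < w) (h : r * w + c = r' * w + c') : r = r' ∧ c = c' := by
  have hr : r = r' := by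
    by_contra hne
    rcases lt_or_gt_of_ne hne with hlt | hgt
    · have h1 : r + 1 ≤ r' := hlt
      nlinarith [mul_le_mul_of_nonneg_right h1 hw.le]
    · have h1 : r' + 1 ≤ r := hgt
      nlinarith [mul_le_mul_of_nonneg_right h1 hw.le]
  exact ⟨hr, by subst hr; linarith⟩

-- B's dict after the first pass, looked up at key k (nodup keys)
lemma dict_fold_getD (ps : List (Int × Int)) (d : PySem.Dict Int Int) (k : Int)
    (hnd : (ps.map (fun p => p.2 - 1)).Nodup) :
    (ps.foldl (fun d p => d.insert (p.2 - 1) (PySem.Int.mod p.1 2 + 1)) d).getD k 0 =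
      match ps.find? (fun p => p.2 - 1 == k) with
      | some p => PySem.Int.mod p.1 2 + 1
      | none => d.getD k 0 := by
  induction ps generalizing d with
  | nil => simp
  | cons p ps ih =>
    simp only [List.map_cons, List.nodup_cons] at hnd
    simp only [List.foldl_cons, List.find?_cons]
    by_cases hk : p.2 - 1 = k
    · have hfind : ps.find? (fun q => q.2 - 1 == k) = none := by
        rw [List.find?_eq_none]
        intro q hq
        simp only [beq_iff_eq]
        intro hqe
        exact hnd.1 (hk ▸ hqe ▸ List.mem_map_of_mem hq)
      rw [ih _ hnd.2, hfind]
      simp [hk, PySem.Dict.getD_insert_self]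
    · have hbeq : (p.2 - 1 == k) = false := by simp [hk]
      rw [ih _ hnd.2, hbeq]
      cases hfind : ps.find? (fun q => q.2 - 1 == k) with
      | some q => simp
      | none => simp [PySem.Dict.getD_insert, Ne.symm hk]

-- A's one mutation step, rewritten in List.set form (indices nonnegative)
lemma placeMove_eq (w : Int) (st : List (List Int)) (p : Int × Int)
    (hrow0 : 0 ≤ PySem.Int.floordiv (p.2 - 1) w) (hcol0 : 0 ≤ PySem.Int.mod (p.2 - 1) w) :
    placeMove w st p =
      st.set (PySem.Int.floordiv (p.2 - 1) w).toNat
        ((st.getD (PySem.Int.floordiv (p.2 - 1) w).toNat []).set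
          (PySem.Int.mod (p.2 - 1) w).toNat (PySem.Int.mod p.1 2 + 1)) := by
  simp only [placeMove]
  rw [PySem.List.pyGetD_of_nonneg _ _ hrow0, PySem.List.pySetD_of_nonneg _ _ hcol0,
    PySem.List.pySetD_of_nonneg _ _ hrow0]

-- A's grid after the mutation loop: shape preserved, entries characterised by the first
-- (unique) move hitting the cell
lemma grid_fold_spec (w h : Int) (hw : 0 < w) (hh : 0 < h) :
    ∀ (ps : List (Int × Int)) (st : List (List Int)),
      (∀ p ∈ ps, 1 ≤ p.2 ∧ p.2 ≤ w * h) →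
      (ps.map (fun p => p.2 - 1)).Nodup →
      st.length = h.toNat →
      (∀ r : Nat, r < h.toNat → (st.getD r []).length = w.toNat) →
      (ps.foldl (placeMove w) st).length = h.toNat ∧
      (∀ r : Nat, r < h.toNat → ((ps.foldl (placeMove w) st).getD r []).length = w.toNat) ∧
      (∀ r c : Nat, r < h.toNat → c < w.toNat →
        (((ps.foldl (placeMove w) st).getD r []).getD c 0) =
          match ps.find? (fun p => p.2 - 1 == (r : Int) * w + (c : Int)) with
          | some p => PySem.Int.mod p.1 2 + 1
          | none => (st.getD r []).getD c 0) := by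
  intro ps
  induction ps with
  | nil => intro st _ _ hlen hrow; exact ⟨hlen, hrow, by intro r c _ _; simp⟩
  | cons p ps ih =>
    intro st hbnd hnd hlen hrow
    simp only [List.map_cons, List.nodup_cons] at hnd
    obtain ⟨hm1, hm2⟩ := hbnd p (List.mem_cons_self ..)
    have ha0 : (0 : Int) ≤ p.2 - 1 := by omega
    have hawh : p.2 - 1 < w * h := by omega
    have hcol0 : 0 ≤ PySem.Int.mod (p.2 - 1) w := PySem.Int.mod_nonneg _ hw
    have hcolw : PySem.Int.mod (p.2 - 1) w < w := PySem.Int.mod_lt _ hw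
    have hrow0 : 0 ≤ PySem.Int.floordiv (p.2 - 1) w := by
      rw [PySem.Int.le_floordiv_iff_mul_le hw]; simpa using ha0
    have hrowh : PySem.Int.floordiv (p.2 - 1) w < h := by
      rw [PySem.Int.floordiv_lt_iff_lt_mul hw]; nlinarith
    have hsum : PySem.Int.floordiv (p.2 - 1) w * w + PySem.Int.mod (p.2 - 1) w = p.2 - 1 :=
      PySem.Int.floordiv_mul_add_mod _ _
    set rn : Nat := (PySem.Int.floordiv (p.2 - 1) w).toNat with hrn
    set cn : Nat := (PySem.Int.mod (p.2 - 1) w).toNat with hcn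
    have hrni : (rn : Int) = PySem.Int.floordiv (p.2 - 1) w := Int.toNat_of_nonneg hrow0
    have hcni : (cn : Int) = PySem.Int.mod (p.2 - 1) w := Int.toNat_of_nonneg hcol0
    have hrnlt : rn < h.toNat := by omega
    have hcnlt : cn < w.toNat := by omega
    have hstep := placeMove_eq w st p hrow0 hcol0
    rw [← hrn, ← hcn] at hstep
    -- shape of the updated grid
    have hlen' : (placeMove w st p).length = h.toNat := by rw [hstep, List.length_set, hlen]
    have hgetD' : ∀ r : Nat, r < h.toNat → (placeMove w st p).getD r [] =
        if r = rn then (st.getD rn []).set cn (PySem.Int.mod p.1 2 + 1)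
        else st.getD r [] := by
      intro r hr
      rw [hstep]
      by_cases hrr : r = rn
      · subst hrr
        rw [List.getD_eq_getElem?_getD, List.getElem?_set_self (by omega)]
        simp
      · rw [List.getD_eq_getElem?_getD, List.getElem?_set_ne (by omega),
          ← List.getD_eq_getElem?_getD]
        simp [hrr]
    have hrow' : ∀ r : Nat, r < h.toNat → ((placeMove w st p).getD r []).length = w.toNat := by
      intro r hr
      rw [hgetD' r hr]
      by_cases hrr : r = rn
      · rw [if_pos hrr, List.length_set]; exact hrow _ hrnlt
      · rw [if_neg hrr]; exact hrow _ hr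
    obtain ⟨ihlen, ihrow, ihentry⟩ := ih (placeMove w st p)
      (fun q hq => hbnd q (List.mem_cons_of_mem _ hq)) hnd.2 hlen' hrow'
    simp only [List.foldl_cons]
    refine ⟨ihlen, ihrow, ?_⟩
    intro r c hr hc
    rw [ihentry r c hr hc, List.find?_cons]
    by_cases hkey : p.2 - 1 = (r : Int) * w + (c : Int)
    · -- this move hits cell (r, c); no later move does (nodup)
      obtain ⟨hre, hce⟩ := cell_key_inj w (PySem.Int.floordiv (p.2 - 1) w) (r : Int)
        (PySem.Int.mod (p.2 - 1) w) (c : Int) hw hcol0 hcolw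
        (by omega) (by omega) (by rw [hsum, hkey])
      have hfind : ps.find? (fun q => q.2 - 1 == (r : Int) * w + (c : Int)) = none := by
        rw [List.find?_eq_none]
        intro q hq
        simp only [beq_iff_eq]
        intro hqe
        exact hnd.1 (by rw [hkey, ← hqe]; exact List.mem_map_of_mem hq)
      rw [hfind]
      have hbeq : (p.2 - 1 == (r : Int) * w + (c : Int)) = true := by simp [hkey]
      rw [hbeq]
      simp only []
      rw [hgetD' r hr]
      have hreq : r = rn := by omega
      have hceq : c = cn := by omega
      rw [if_pos hreq, hceq, List.getD_eq_getElem?_getD,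
        List.getElem?_set_self (by rw [hrow _ hrnlt]; omega)]
      simp
    · -- a different cell: the step does not touch (r, c)
      have hbeq : (p.2 - 1 == (r : Int) * w + (c : Int)) = false := by simp [hkey]
      rw [hbeq]
      cases hfind : ps.find? (fun q => q.2 - 1 == (r : Int) * w + (c : Int)) with
      | some q => simp
      | none =>
        simp only []
        rw [hgetD' r hr]
        by_cases hrr : r = rn
        · rw [if_pos hrr]
          have hcc : c ≠ cn := by
            intro hcc
            apply hkey
            rw [← hsum, ← hrni, ← hcni, hrr, hcc]
          rw [List.getD_eq_getElem?_getD, List.getElem?_set_ne (fun hh => hcc hh.symm),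
            ← List.getD_eq_getElem?_getD, hrr]
        · rw [if_neg hrr]

-- ===== VERDICT (by name: the statement is the Claim_ definition above) =====
theorem game_sequence_to_state_spec : Claim_equal_game_sequence_to_state := by
  intro gs dim _hdom hpre
  obtain ⟨hw, hh, hbnd, hnd⟩ := hpre
  unfold Spec_game_sequence_to_state game_sequence_to_state game_sequence_to_state_alt
  simp only []
  refine Prod.ext ?_ rfl
  -- the flat keys move-1 of the enumerated moves are pairwise distinct
  have hkeys : ((PySem.List.enumerate gs).map (fun p : Int × Int => p.2 - 1)).Nodup := by
    have hmap : (PySem.List.enumerate gs).map (fun p : Int × Int => p.2 - 1)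
        = gs.map (fun m => m - 1) := by
      conv_rhs => rw [← PySem.List.map_snd_enumerate gs 0]
      rw [List.map_map]
      rfl
    rw [hmap]
    exact hnd.map (fun a b hab => by omega)
  have hbnd' : ∀ p ∈ PySem.List.enumerate gs, 1 ≤ p.2 ∧ p.2 ≤ dim.1 * dim.2 := by
    intro p hp
    rw [PySem.List.mem_enumerate_iff] at hp
    obtain ⟨k, hk, rfl⟩ := hp
    exact hbnd _ (List.getElem_mem hk)
  -- the initial all-zero grid
  have hlen0 : ((PySem.List.pyRange 0 dim.2 1).map
      (fun _ => (PySem.List.pyRange 0 dim.1 1).map (fun _ => (0 : Int)))).length = dim.2.toNat := by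
    simp [PySem.List.length_pyRange_one]
  have hgetD0 : ∀ r : Nat, r < dim.2.toNat →
      (((PySem.List.pyRange 0 dim.2 1).map
        (fun _ => (PySem.List.pyRange 0 dim.1 1).map (fun _ => (0 : Int)))).getD r [])
      = (PySem.List.pyRange 0 dim.1 1).map (fun _ => (0 : Int)) := by
    intro r hr
    rw [List.getD_eq_getElem _ _ (by rw [hlen0]; omega), List.getElem_map]
  have hrow0 : ∀ r : Nat, r < dim.2.toNat →
      (((PySem.List.pyRange 0 dim.2 1).map
        (fun _ => (PySem.List.pyRange 0 dim.1 1).map (fun _ => (0 : Int)))).getD r []).length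
      = dim.1.toNat := by
    intro r hr
    rw [hgetD0 r hr]
    simp [PySem.List.length_pyRange_one]
  obtain ⟨hlenA, hrowA', hentryA⟩ := grid_fold_spec dim.1 dim.2 hw hh
    (PySem.List.enumerate gs) _ hbnd' hkeys hlen0 hrow0
  -- lengths of B's grid
  have hlenB : ((PySem.List.pyRange 0 dim.2 1).map (fun row =>
      (PySem.List.pyRange 0 dim.1 1).map (fun col =>
        (((PySem.List.enumerate gs).foldl
          (fun d p => d.insert (p.2 - 1) (PySem.Int.mod p.1 2 + 1))
          PySem.Dict.empty).getD (row * dim.1 + col) 0)))).length = dim.2.toNat := by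
    simp [PySem.List.length_pyRange_one]
  apply List.ext_getElem (by rw [hlenA, hlenB])
  intro r hr1 hr2
  have hrh : r < dim.2.toNat := by rw [hlenA] at hr1; exact hr1
  -- B's r-th row
  rw [List.getElem_map, PySem.List.getElem_pyRange_one]
  apply List.ext_getElem
  · rw [← List.getD_eq_getElem _ [] hr1, hrowA' r hrh]
    simp [PySem.List.length_pyRange_one]
  intro c hc1 hc2
  have hcw : c < dim.1.toNat := by
    rw [← List.getD_eq_getElem _ [] hr1, hrowA' r hrh] at hc1
    exact hc1
  rw [List.getElem_map, PySem.List.getElem_pyRange_one]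
  -- both entries via their characterisations
  rw [show (((PySem.List.enumerate gs).foldl (placeMove dim.1) _)[r][c]) =
      ((((PySem.List.enumerate gs).foldl (placeMove dim.1) _).getD r []).getD c 0) from by
    rw [List.getD_eq_getElem _ [] hr1, List.getD_eq_getElem _ 0 hc1]]
  rw [hentryA r c hrh hcw, dict_fold_getD _ _ _ hkeys]
  have hz : (0 : Int) + (r : Int) = (r : Int) := by ring
  have hz' : (0 : Int) + (c : Int) = (c : Int) := by ring
  rw [hz, hz']
  cases hfind : (PySem.List.enumerate gs).find? (fun p => p.2 - 1 == (r : Int) * dim.1 + (c : Int)) with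
  | some q => rfl
  | none =>
    rw [hgetD0 r hrh, PySem.Dict.getD_empty]
    have hcd : ((PySem.List.pyRange 0 dim.1 1).map (fun _ => (0 : Int))).getD c 0 = 0 := by
      rw [List.getD_eq_getElem _ 0 (by simp [PySem.List.length_pyRange_one]; omega), List.getElem_map]
    rw [hcd]
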